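-- pv_equiv track=rewrite | github.com/FrancoEvans/analisis-de-texto | tp.py | palabra_mas_larga
-- ===== SOURCE A (Python) =====
-- def palabra_mas_larga(lista_palabras):
--     if not lista_palabras:
--         return []
--     mayores = [lista_palabras[0]]
--     for palabra in lista_palabras:
--         if len(palabra) > len(mayores[0]):
--             mayores.clear()
--             mayores.append(palabra)
--         elif len(palabra) == len(mayores[0]):
--             if palabra not in mayores:
--                 mayores.append(palabra)
--     return mayores
-- ===== SOURCE B (Python) =====
-- def palabra_mas_larga(lista_palabras):
--     if not lista_palabras:
--         return []
--     max_len = max(len(p) for p in lista_palabras)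
--     resultado = []
--     for p in lista_palabras:
--         if len(p) == max_len and p not in resultado:
--             resultado.append(p)
--     return resultado
-- ===== Notes on version B (the rewrite author's own statement) =====
-- stated objective: simpler
-- what changed: B computes the maximum word length in a separate first pass and then collects the distinct words of that length in a second filtering pass, replacing A's single running-max pass that clears and rebuilds its accumulator in place.
import Mathlib
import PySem

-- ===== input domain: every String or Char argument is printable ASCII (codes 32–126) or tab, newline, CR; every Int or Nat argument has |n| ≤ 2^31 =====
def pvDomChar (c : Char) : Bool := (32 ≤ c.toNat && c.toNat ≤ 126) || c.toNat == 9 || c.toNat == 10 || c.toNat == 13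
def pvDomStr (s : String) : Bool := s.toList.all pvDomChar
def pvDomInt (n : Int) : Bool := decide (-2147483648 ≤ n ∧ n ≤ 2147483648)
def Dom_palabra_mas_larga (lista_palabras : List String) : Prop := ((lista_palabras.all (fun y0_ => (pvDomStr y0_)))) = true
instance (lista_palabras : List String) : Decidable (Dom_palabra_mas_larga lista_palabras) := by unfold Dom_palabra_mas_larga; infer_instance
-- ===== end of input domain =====

-- B replaces A's single running-max pass (which clears and rebuilds its accumulator)
-- by a two-pass max-then-filter decomposition; same results, simpler structure.


-- ===== PORT A =====
-- loop body of A; mayores is never empty in A, so 'headD ""' reads exactly mayores[0]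
def pmlStepA (mayores : List String) (palabra : String) : List String :=
  if PySem.Str.len palabra > PySem.Str.len (mayores.headD "") then [palabra]
  else if PySem.Str.len palabra = PySem.Str.len (mayores.headD "") then
    (if palabra ∈ mayores then mayores else mayores ++ [palabra])
  else mayores

def palabra_mas_larga (lista_palabras : List String) : List String :=
  match lista_palabras with
  | [] => []
  | x :: _ => lista_palabras.foldl pmlStepA [x]

-- ===== PORT B =====
-- loop body of B: append palabra iff it has the max length and is not yet collected
def pmlStepB (max_len : Int) (resultado : List String) (palabra : String) : List String :=
  if PySem.Str.len palabra = max_len ∧ palabra ∉ resultado then resultado ++ [palabra]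
  else resultado

def palabra_mas_larga_alt (lista_palabras : List String) : List String :=
  match lista_palabras with
  | [] => []
  | _ =>
    let max_len := (PySem.List.max? (lista_palabras.map (fun p => PySem.Str.len p)) (fun y => y)).getD 0
    lista_palabras.foldl (pmlStepB max_len) []

-- ===== PRECONDITION & SPEC =====
def Spec_palabra_mas_larga (lista_palabras : List String) (out : List String) : Prop := out = palabra_mas_larga_alt lista_palabras
instance (lista_palabras : List String) (out : List String) : Decidable (Spec_palabra_mas_larga lista_palabras out) := by unfold Spec_palabra_mas_larga; infer_instance

-- ===== CLAIM (what is proved, stated in full; the proofs are below) =====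
def Claim_equal_palabra_mas_larga : Prop := ∀ (lista_palabras : List String), Dom_palabra_mas_larga lista_palabras → Spec_palabra_mas_larga lista_palabras (palabra_mas_larga lista_palabras)

-- ===== LEMMAS AND PROOFS =====

-- running maximum of word lengths over l, seeded with m
def pmlMx (l : List String) (m : Int) : Int :=
  l.foldl (fun a p => max a (PySem.Str.len p)) m

lemma pmlMx_ge (l : List String) (m : Int) : m ≤ pmlMx l m := by
  induction l generalizing m with
  | nil => simp [pmlMx]
  | cons p t ih =>
    have := ih (max m (PySem.Str.len p))
    simp only [pmlMx, List.foldl_cons] at *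
    exact le_trans (le_max_left _ _) this

-- A's loop from a nonempty accumulator of words of common length m equals B's
-- filtering loop for the final maximum, restarted from [] whenever the maximum grows.
lemma pml_key (l : List String) (m : Int) (acc : List String)
    (hne : acc ≠ []) (hall : ∀ a ∈ acc, PySem.Str.len a = m) :
    l.foldl pmlStepA acc =
      l.foldl (pmlStepB (pmlMx l m)) (if pmlMx l m ≤ m then acc else []) := by
  induction l generalizing m acc with
  | nil => simp [pmlMx]
  | cons p t ih =>
    obtain ⟨a, r, rfl⟩ : ∃ a r, acc = a :: r := by
      cases acc with | nil => exact absurd rfl hne | cons a r => exact ⟨a, r, rfl⟩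
    have ha : PySem.Str.len a = m := hall a (by simp)
    have hmx : pmlMx (p :: t) m = pmlMx t (max m (((p.length : Int)))) := rfl
    simp only [PySem.Str.len_eq, String.length_toList] at ha hall hmx ih ⊢
    rcases lt_trichotomy (((p.length : Int))) m with hlt | heq | hgt
    · -- len p < m : A keeps acc; B filters p out
      have hA : pmlStepA (a :: r) p = a :: r := by
        have h1 : ¬ ((a.length : Int) < (p.length : Int)) := by omega
        have h2 : ¬ ((p.length : Int) = (a.length : Int)) := by omega
        simp [pmlStepA, h1, h2]
      have hmax : max m (((p.length : Int))) = m := by omega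
      have hM := pmlMx_ge t m
      simp only [List.foldl_cons, hA, hmx, hmax]
      rw [ih m (a :: r) (by simp) hall]
      by_cases hle : pmlMx t m ≤ m
      · simp only [if_pos hle]
        congr 1
        simp [pmlStepB]; omega
      · simp only [if_neg hle]
        congr 1
        simp [pmlStepB]; omega
    · -- len p = m : A appends if new; so does B (max unchanged)
      have hA : pmlStepA (a :: r) p =
          (if p ∈ a :: r then a :: r else (a :: r) ++ [p]) := by
        simp only [pmlStepA, PySem.Str.len_eq, String.length_toList, List.headD_cons, ha, heq]
        simp
      have hmax : max m (((p.length : Int))) = m := by omega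
      have hM := pmlMx_ge t m
      set acc' := (if p ∈ a :: r then a :: r else (a :: r) ++ [p]) with hacc'
      have hne' : acc' ≠ [] := by
        simp only [hacc']; split <;> simp
      have hall' : ∀ a' ∈ acc', ((a'.length : Int)) = m := by
        intro a' ha'
        simp only [hacc'] at ha'
        split at ha'
        · exact hall a' ha'
        · rcases List.mem_append.mp ha' with h | h
          · exact hall a' h
          · simp at h; subst h; exact heq
      simp only [List.foldl_cons, hA, hmx, hmax]
      rw [ih m acc' hne' hall']
      by_cases hle : pmlMx t m ≤ m
      · simp only [if_pos hle]
        congr 1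
        have hmm : pmlMx t m = m := le_antisymm hle hM
        by_cases hpm : p = a ∨ p ∈ r <;>
          simp [hacc', pmlStepB, hmm, heq, hpm]
      · simp only [if_neg hle]
        congr 1
        simp [pmlStepB]; omega
    · -- len p > m : A resets to [p]; B's max grows past m
      have hA : pmlStepA (a :: r) p = [p] := by
        simp [pmlStepA, ha]; omega
      have hmax : max m (((p.length : Int))) = ((p.length : Int)) := by omega
      have hM := pmlMx_ge t (((p.length : Int)))
      simp only [List.foldl_cons, hA, hmx, hmax]
      rw [ih (((p.length : Int))) [p] (by simp) (by simp)]
      have hnle : ¬ pmlMx t (((p.length : Int))) ≤ m := by omega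
      simp only [if_neg hnle]
      by_cases hle : pmlMx t (((p.length : Int))) ≤ ((p.length : Int))
      · simp only [if_pos hle]
        congr 1
        have : pmlMx t (((p.length : Int))) = ((p.length : Int)) := le_antisymm hle hM
        simp [pmlStepB, this]
      · simp only [if_neg hle]
        congr 1
        simp [pmlStepB]; omega

-- ===== VERDICT (by name: the statement is the Claim_ definition above) =====
theorem palabra_mas_larga_spec : Claim_equal_palabra_mas_larga := by
  intro l _
  unfold Spec_palabra_mas_larga
  cases l with
  | nil => rfl
  | cons x t =>
    have hmax : (PySem.List.max? ((x :: t).map (fun p => PySem.Str.len p)) (fun y => y)).getD 0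
        = pmlMx t (((x.length : Int))) := by
      rw [List.map_cons, PySem.List.max?_id_cons]
      simp [pmlMx, List.foldl_map]
    show (x :: t).foldl pmlStepA [x] = _
    rw [pml_key (x :: t) (((x.length : Int))) [x] (by simp) (by simp)]
    simp only [palabra_mas_larga_alt, hmax]
    have hM := pmlMx_ge t (((x.length : Int)))
    have hmx : pmlMx (x :: t) (((x.length : Int))) = pmlMx t (((x.length : Int))) := by
      simp [pmlMx]
    rw [hmx]
    by_cases hle : pmlMx t (((x.length : Int))) ≤ ((x.length : Int))
    · have hEq : pmlMx t (((x.length : Int))) = ((x.length : Int)) := le_antisymm hle hM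
      simp only [if_pos hle, List.foldl_cons]
      congr 1
      simp [pmlStepB, hEq]
    · simp only [if_neg hle]
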